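-- pv_equiv track=rewrite | github.com/alvabai/trac-multiproject | plugins/multiproject/multiproject/core/permissions.py | _group_tuples
-- ===== SOURCE A (Python) =====
-- def _group_tuples(tuples):
--     """ Groups tuples by items in both ways
--         Works only with two item tuples
--     """
--     ab = {}
--     ba = {}
--     for a, b in tuples:
--         if a not in ab:
--             ab[a] = set([])
--         if b not in ba:
--             ba[b] = set([])
--         ba[b].add(a)
--         ab[a].add(b)
--     return ab, ba
-- ===== SOURCE B (Python) =====
-- def _group_tuples(tuples):
--     """ Groups tuples by items in both ways
--         Works only with two item tuples
--     """
--     firsts = list(dict.fromkeys(a for a, b in tuples))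
--     seconds = list(dict.fromkeys(b for a, b in tuples))
--     ab = {a: {b2 for a2, b2 in tuples if a2 == a} for a in firsts}
--     ba = {b: {a2 for a2, b2 in tuples if b2 == b} for b in seconds}
--     return ab, ba
-- ===== Notes on version B (the rewrite author's own statement) =====
-- stated objective: alternative
-- what changed: A makes one pass over the tuples, mutating two dict-of-sets in lockstep; B never mutates a dict: it first deduplicates the first (resp. second) components in first-occurrence order, then builds each group with a separate per-key scan of the tuple list (nested comprehensions), trading A's O(n) single pass for an O(n*k) gather per distinct key.
import Mathlib
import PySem

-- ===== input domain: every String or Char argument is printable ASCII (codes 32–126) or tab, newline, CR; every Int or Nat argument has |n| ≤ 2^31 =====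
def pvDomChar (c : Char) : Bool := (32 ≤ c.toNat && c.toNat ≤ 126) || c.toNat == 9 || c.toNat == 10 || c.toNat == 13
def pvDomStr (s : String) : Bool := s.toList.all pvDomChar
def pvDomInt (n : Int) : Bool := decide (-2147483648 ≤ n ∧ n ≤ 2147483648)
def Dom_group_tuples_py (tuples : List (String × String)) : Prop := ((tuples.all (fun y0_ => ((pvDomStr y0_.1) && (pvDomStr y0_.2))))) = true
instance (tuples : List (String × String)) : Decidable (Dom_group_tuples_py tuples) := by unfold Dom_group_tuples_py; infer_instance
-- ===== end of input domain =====

-- B abandons A's single mutating pass over two dict-of-sets: it deduplicates the first (resp.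
-- second) components in first-occurrence order, then gathers each group by a separate per-key
-- scan of the tuples (objective: alternative algorithm; not faster).

-- ===== PORT A =====
-- 'ba[b].add(a)' mutates the set stored at key b, which is present at that point; it is ported
-- as re-storing the looked-up set with the element added (the getD default is never reached).
def group_tuples_py (tuples : List (String × String)) :
    (List (String × List String)) × (List (String × List String)) :=
  let r := tuples.foldl
    (fun st t =>
      let a := t.1
      let b := t.2
      let ab := if st.1.contains a then st.1 else st.1.insert a PySem.Set.empty
      let ba := if st.2.contains b then st.2 else st.2.insert b PySem.Set.empty
      let ba := ba.insert b (PySem.Set.add (ba.getD b PySem.Set.empty) a)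
      let ab := ab.insert a (PySem.Set.add (ab.getD a PySem.Set.empty) b)
      (ab, ba))
    ((PySem.Dict.empty : PySem.Dict String (PySem.Set String)),
     (PySem.Dict.empty : PySem.Dict String (PySem.Set String)))
  (r.1.items, r.2.items)

-- ===== PORT B =====
-- list(dict.fromkeys(stream)) = the distinct elements in first-occurrence order = PySem.Set.ofList;
-- each dict comprehension maps those keys to the set comprehension's set, built left to right
-- over the filtered stream = PySem.Set.ofList of the filtered, projected list.
def group_tuples_py_alt (tuples : List (String × String)) :
    (List (String × List String)) × (List (String × List String)) :=
  let firsts := PySem.Set.ofList (tuples.map (fun t => t.1))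
  let seconds := PySem.Set.ofList (tuples.map (fun t => t.2))
  (firsts.map (fun a => (a, PySem.Set.ofList ((tuples.filter (fun t => t.1 == a)).map (fun t => t.2)))),
   seconds.map (fun b => (b, PySem.Set.ofList ((tuples.filter (fun t => t.2 == b)).map (fun t => t.1)))))

-- ===== PRECONDITION & SPEC =====
def Spec_group_tuples_py (tuples : List (String × String)) (out : (List (String × List String)) × (List (String × List String))) : Prop := out = group_tuples_py_alt tuples
instance (tuples : List (String × String)) (out : (List (String × List String)) × (List (String × List String))) : Decidable (Spec_group_tuples_py tuples out) := by unfold Spec_group_tuples_py; infer_instance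

-- ===== CLAIM (what is proved, stated in full; the proofs are below) =====
def Claim_equal_group_tuples_py : Prop := ∀ (tuples : List (String × String)), Dom_group_tuples_py tuples → Spec_group_tuples_py tuples (group_tuples_py tuples)

-- ===== LEMMAS AND PROOFS =====

-- A's per-tuple update of one of its two dicts, abstracted over which component is the key.
def pvStep (key val : String × String → String)
    (d : PySem.Dict String (PySem.Set String)) (t : String × String) :
    PySem.Dict String (PySem.Set String) :=
  let d1 := if d.contains (key t) then d else d.insert (key t) PySem.Set.empty
  d1.insert (key t) (PySem.Set.add (d1.getD (key t) PySem.Set.empty) (val t))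

lemma pvStep_eq_insert (key val : String × String → String)
    (d : PySem.Dict String (PySem.Set String)) (t : String × String) :
    pvStep key val d t
      = d.insert (key t) (PySem.Set.add (d.getD (key t) PySem.Set.empty) (val t)) := by
  unfold pvStep
  by_cases h : d.contains (key t) = true
  · simp [h]
  · simp only [Bool.not_eq_true] at h
    simp only [h, Bool.false_eq_true, if_false]
    rw [PySem.Dict.getD_insert_self, PySem.Dict.insert_insert_self,
        PySem.Dict.getD_of_not_contains _ _ h]

lemma pvGetD_groupFold (key val : String × String → String) (l : List (String × String))
    (d : PySem.Dict String (PySem.Set String)) (c : String) :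
    (l.foldl (fun d t => d.insert (key t) (PySem.Set.add (d.getD (key t) PySem.Set.empty) (val t))) d).getD c PySem.Set.empty
      = PySem.Set.update (d.getD c PySem.Set.empty) ((l.filter (fun t => key t == c)).map val) := by
  induction l generalizing d with
  | nil => simp [PySem.Set.update_nil]
  | cons t l ih =>
    simp only [List.foldl_cons, List.filter_cons]
    by_cases h : key t = c
    · subst h
      simp only [beq_self_eq_true, if_true, List.map_cons]
      rw [ih, PySem.Dict.getD_insert_self, PySem.Set.update_cons]
    · have hb : (key t == c) = false := by simpa using h
      simp only [hb, Bool.false_eq_true, if_false]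
      rw [ih, PySem.Dict.getD_insert_of_ne _ _ _ (fun hc => h hc.symm)]

-- A's fold, characterized as a map over the deduplicated key stream.
lemma pvItemsA (key val : String × String → String) (l : List (String × String)) :
    (l.foldl (fun d t => d.insert (key t) (PySem.Set.add (d.getD (key t) PySem.Set.empty) (val t)))
        (PySem.Dict.empty : PySem.Dict String (PySem.Set String))).items
      = (PySem.Set.ofList (l.map key)).map
          (fun c => (c, PySem.Set.ofList ((l.filter (fun t => key t == c)).map val))) := by
  have hk : (l.foldl (fun d t => d.insert (key t) (PySem.Set.add (d.getD (key t) PySem.Set.empty) (val t)))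
      (PySem.Dict.empty : PySem.Dict String (PySem.Set String))).keys = PySem.Set.ofList (l.map key) := by
    have := PySem.Dict.keys_foldl_insert_key l key
      (fun d t => PySem.Set.add (d.getD (key t) PySem.Set.empty) (val t))
      (PySem.Dict.empty : PySem.Dict String (PySem.Set String))
    simpa [PySem.Dict.keys_empty, PySem.Set.update_nil_left] using this
  have hnd : (l.foldl (fun d t => d.insert (key t) (PySem.Set.add (d.getD (key t) PySem.Set.empty) (val t)))
      (PySem.Dict.empty : PySem.Dict String (PySem.Set String))).keys.Nodup := by
    rw [hk]; exact PySem.Set.nodup_ofList _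
  rw [PySem.Dict.items_eq_map_keys _ hnd PySem.Set.empty, hk]
  refine List.map_congr_left (fun c _ => ?_)
  rw [pvGetD_groupFold]
  simp [PySem.Dict.getD_empty, PySem.Set.update_nil_left]

-- ===== VERDICT (by name: the statement is the Claim_ definition above) =====
theorem group_tuples_py_spec : Claim_equal_group_tuples_py := by
  intro tuples _
  unfold Spec_group_tuples_py
  have hA : group_tuples_py tuples
      = ((tuples.foldl (fun st t => (pvStep (fun t => t.1) (fun t => t.2) st.1 t,
                                     pvStep (fun t => t.2) (fun t => t.1) st.2 t))
            ((PySem.Dict.empty : PySem.Dict String (PySem.Set String)),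
             (PySem.Dict.empty : PySem.Dict String (PySem.Set String)))).1.items,
         (tuples.foldl (fun st t => (pvStep (fun t => t.1) (fun t => t.2) st.1 t,
                                     pvStep (fun t => t.2) (fun t => t.1) st.2 t))
            ((PySem.Dict.empty : PySem.Dict String (PySem.Set String)),
             (PySem.Dict.empty : PySem.Dict String (PySem.Set String)))).2.items) := rfl
  rw [hA, PySem.List.foldl_prod_mk]
  have hs1 : pvStep (fun t : String × String => t.1) (fun t => t.2)
      = fun d t => d.insert t.1 (PySem.Set.add (d.getD t.1 PySem.Set.empty) t.2) :=
    funext fun d => funext fun t => pvStep_eq_insert _ _ d t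
  have hs2 : pvStep (fun t : String × String => t.2) (fun t => t.1)
      = fun d t => d.insert t.2 (PySem.Set.add (d.getD t.2 PySem.Set.empty) t.1) :=
    funext fun d => funext fun t => pvStep_eq_insert _ _ d t
  rw [hs1, hs2]
  have h1 := pvItemsA (fun t => t.1) (fun t => t.2) tuples
  have h2 := pvItemsA (fun t => t.2) (fun t => t.1) tuples
  simp only [] at h1 h2
  rw [h1, h2]
  rfl
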